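-- pv_equiv track=rewrite | github.com/Rutibex/CampaignForge | campaign_forge/plugins/magicitem/exports.py | _safe_slug
-- ===== SOURCE A (Python) =====
-- def _safe_slug(text: str) -> str:
--     # Simple slugging (no external deps)
--     keep = []
--     for ch in text.lower():
--         if ch.isalnum():
--             keep.append(ch)
--         elif ch in (" ", "-", "_"):
--             keep.append("-")
--     slug = "".join(keep)
--     while "--" in slug:
--         slug = slug.replace("--", "-")
--     return slug.strip("-")[:60] or "magic-item"
-- ===== SOURCE B (Python) =====
-- def _safe_slug(text: str) -> str:
--     # Tokenise-and-rejoin: keep alnum chars, turn " -_" separators into spaces,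
--     # drop everything else; split() collapses separator runs and trims the ends.
--     cleaned = "".join(
--         ch if ch.isalnum() else (" " if ch in " -_" else "")
--         for ch in text.lower()
--     )
--     slug = "-".join(cleaned.split())
--     return slug[:60] or "magic-item"
-- ===== Notes on version B (the rewrite author's own statement) =====
-- stated objective: idiomatic
-- what changed: Replaced the append-loop plus repeated replace-until-fixpoint dash collapsing and edge stripping with a tokenise-then-rejoin pipeline: map separator characters to spaces, str.split() to drop empty runs and edges, then join the words with dashes.
import Mathlib
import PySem

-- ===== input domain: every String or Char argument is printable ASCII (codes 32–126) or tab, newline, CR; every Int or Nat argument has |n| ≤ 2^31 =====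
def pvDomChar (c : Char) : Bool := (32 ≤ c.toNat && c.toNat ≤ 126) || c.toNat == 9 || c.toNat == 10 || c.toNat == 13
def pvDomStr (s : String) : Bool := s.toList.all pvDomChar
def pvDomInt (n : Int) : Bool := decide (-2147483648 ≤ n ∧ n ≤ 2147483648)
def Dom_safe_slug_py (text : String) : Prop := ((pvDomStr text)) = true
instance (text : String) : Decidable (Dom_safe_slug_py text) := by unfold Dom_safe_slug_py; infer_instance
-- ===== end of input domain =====

-- B replaces A's collapse-duplicate-dashes fixpoint loop (while "--" in slug: replace) with a
-- tokenise-then-rejoin decomposition (separators to spaces, split, join); return values agree everywhere.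

-- ===== PORT A =====
-- repDD is one pass of slug.replace("--", "-") written structurally; it and the lemmas up to
-- replace_dd_length_lt exist only to prove termination of the while-loop (cited in decreasing_by).

def repDD : List Char → List Char
  | '-' :: '-' :: t => '-' :: repDD t
  | c :: t => c :: repDD t
  | [] => []

theorem repDD_dd (t : List Char) : repDD ('-' :: '-' :: t) = '-' :: repDD t := rfl

theorem repDD_cons_ne (c : Char) (t : List Char) (hc : c ≠ '-') :
    repDD (c :: t) = c :: repDD t := by
  cases t with
  | nil => simp [repDD]
  | cons d t2 => by_cases hd : d = '-' <;> simp [repDD, hc, hd]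

theorem repDD_dash_cons (t : List Char) (h : t.head? ≠ some '-') :
    repDD ('-' :: t) = '-' :: repDD t := by
  cases t with
  | nil => simp [repDD]
  | cons d t2 =>
    simp at h
    simp [repDD, h]

theorem replace_dd_go_eq_repDD (fuel : Nat) (l acc : List Char) (h : l.length ≤ fuel) :
    PySem.Chars.replace.go ['-', '-'] ['-'] fuel l acc = acc.reverse ++ repDD l := by
  induction fuel generalizing l acc with
  | zero =>
    cases l with
    | nil => simp [PySem.Chars.replace.go, repDD]
    | cons c t => simp at h
  | succ n ih =>
    cases l with
    | nil => simp [PySem.Chars.replace.go, repDD]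
    | cons c t =>
      by_cases hp : ['-', '-'].isPrefixOf (c :: t) = true
      · have hc : c = '-' ∧ ∃ t2, t = '-' :: t2 := by
          cases t with
          | nil => simp [List.isPrefixOf] at hp
          | cons d t2 =>
            simp [List.isPrefixOf] at hp
            exact ⟨hp.1.symm, t2, by rw [hp.2]⟩
        obtain ⟨rfl, t2, rfl⟩ := hc
        rw [PySem.Chars.replace.go, if_pos hp, repDD_dd]
        rw [show List.drop ['-','-'].length ('-' :: '-' :: t2) = t2 from rfl]
        rw [ih t2 (['-'].reverse ++ acc) (by simp at h ⊢; omega)]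
        simp
      · rw [PySem.Chars.replace.go]
        simp only [hp, Bool.false_eq_true, if_false]
        rw [ih t (c :: acc) (by simp at h ⊢; omega)]
        have hrep : repDD (c :: t) = c :: repDD t := by
          by_cases hc : c = '-'
          · subst hc
            apply repDD_dash_cons
            intro hh
            cases t with
            | nil => simp at hh
            | cons d t2 =>
              simp at hh; subst hh
              simp [List.isPrefixOf] at hp
          · exact repDD_cons_ne c t hc
        simp [hrep]

theorem replace_dd_eq_repDD (s : List Char) :
    PySem.Chars.replace s ['-', '-'] ['-'] = repDD s := by
  rw [PySem.Chars.replace]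
  simp only [List.isEmpty_cons]
  exact replace_dd_go_eq_repDD s.length s [] (le_refl _)

theorem repDD_length_le (s : List Char) : (repDD s).length ≤ s.length := by
  induction s using repDD.induct with
  | case1 t ih => simp [repDD_dd]; omega
  | case2 c t h ih =>
    have h2 : repDD (c :: t) = c :: repDD t := by
      by_cases hc : c = '-'
      · subst hc
        apply repDD_dash_cons
        intro hh
        cases t with
        | nil => simp at hh
        | cons d t2 =>
          simp at hh
          exact h t2 rfl (by rw [hh])
      · exact repDD_cons_ne c t hc
    simp [h2]; omega
  | case3 => simp [repDD]

theorem repDD_length_lt (s : List Char) (h : ['-','-'] <:+: s) :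
    (repDD s).length < s.length := by
  induction s using repDD.induct with
  | case1 t ih =>
    have := repDD_length_le t
    simp [repDD_dd]; omega
  | case2 c t hne ih =>
    rcases (List.infix_cons_iff).mp h with hpre | hinf
    · exfalso
      rcases hpre with ⟨u, hu⟩
      cases t with
      | nil => simp at hu
      | cons d t2 =>
        have hc : c = '-' ∧ d = '-' := by
          have := hu
          injection this with h1 h2
          injection h2 with h3 h4
          exact ⟨h1.symm, h3.symm⟩
        exact hne t2 hc.1 (by rw [hc.2])
    · have := ih hinf
      have h2 : repDD (c :: t) = c :: repDD t := by
        by_cases hc : c = '-'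
        · subst hc
          apply repDD_dash_cons
          intro hh
          cases t with
          | nil => simp at hh
          | cons d t2 =>
            simp at hh
            exact hne t2 rfl (by rw [hh])
        · exact repDD_cons_ne c t hc
      simp [h2]; omega
  | case3 => simp at h

theorem replace_dd_length_lt (s : List Char) (h : PySem.Chars.isIn ['-', '-'] s = true) :
    (PySem.Chars.replace s ['-', '-'] ['-']).length < s.length := by
  rw [replace_dd_eq_repDD]
  exact repDD_length_lt s ((PySem.Chars.isIn_iff_infix _ _).mp h)

-- the while "--" in slug: slug = slug.replace("--", "-") loop of A
def safe_slug_collapse (s : List Char) : List Char :=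
  if h : PySem.Chars.isIn ['-', '-'] s = true then
    safe_slug_collapse (PySem.Chars.replace s ['-', '-'] ['-'])
  else s
termination_by s.length
decreasing_by exact replace_dd_length_lt s h

def safe_slug_py (text : String) : String :=
  let keep : List Char :=
    (PySem.Str.lower text).toList.foldl (fun acc ch =>
      if PySem.Chars.strIsalnum [ch] then acc ++ [ch]
      else if ch = ' ' ∨ ch = '-' ∨ ch = '_' then acc ++ ['-'] else acc) []
  let slug := safe_slug_collapse keep
  let r := PySem.Chars.slice (PySem.Chars.stripChars slug ['-']) none (some 60)
  if r.isEmpty then "magic-item" else String.ofList r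

-- ===== PORT B =====
def safe_slug_py_alt (text : String) : String :=
  let cleaned : List Char :=
    (PySem.Str.lower text).toList.foldl (fun acc ch =>
      acc ++ (if PySem.Chars.strIsalnum [ch] then [ch]
              else if PySem.Chars.isIn [ch] [' ', '-', '_'] then [' '] else [])) []
  let slug := PySem.Chars.join ['-'] (PySem.Chars.split₀ cleaned)
  let r := PySem.Chars.slice slug none (some 60)
  if r.isEmpty then "magic-item" else String.ofList r

-- ===== PRECONDITION & SPEC =====
def Spec_safe_slug_py (text : String) (out : String) : Prop := out = safe_slug_py_alt text
instance (text : String) (out : String) : Decidable (Spec_safe_slug_py text out) := by unfold Spec_safe_slug_py; infer_instance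

-- ===== CLAIM (what is proved, stated in full; the proofs are below) =====
def Claim_equal_safe_slug_py : Prop := ∀ (text : String), Dom_safe_slug_py text → Spec_safe_slug_py text (safe_slug_py text)

-- ===== LEMMAS AND PROOFS =====

-- squeeze: the fixpoint of replacing "--" by "-" (runs of dashes merged to one)
def squeeze : List Char → List Char
  | '-' :: '-' :: t => squeeze ('-' :: t)
  | c :: t => c :: squeeze t
  | [] => []
termination_by s => s.length

-- the maximal dash-free words of a list, in order
def wordsD : List Char → List (List Char)
  | [] => []
  | c :: t =>
    if c = '-' then wordsD t
    else (c :: t.takeWhile (· ≠ '-')) :: wordsD (t.dropWhile (· ≠ '-'))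
termination_by s => s.length
decreasing_by
  all_goals simp
  all_goals exact List.length_dropWhile_le ..

theorem squeeze_dd (t : List Char) : squeeze ('-' :: '-' :: t) = squeeze ('-' :: t) := by
  simp [squeeze]

theorem squeeze_cons_ne (c : Char) (t : List Char) (hc : c ≠ '-') :
    squeeze (c :: t) = c :: squeeze t := by
  cases t with
  | nil => simp [squeeze]
  | cons d t2 => by_cases hd : d = '-' <;> simp [squeeze, hc, hd]

theorem squeeze_dash_cons (t : List Char) (h : t.head? ≠ some '-') :
    squeeze ('-' :: t) = '-' :: squeeze t := by
  cases t with
  | nil => simp [squeeze]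
  | cons d t2 =>
    simp at h
    simp [squeeze, h]

theorem squeeze_cons₂_ne (c c2 : Char) (t : List Char) (h : ¬(c = '-' ∧ c2 = '-')) :
    squeeze (c :: c2 :: t) = c :: squeeze (c2 :: t) := by
  by_cases hc : c = '-'
  · subst hc
    exact squeeze_dash_cons _ (by simp; intro h2; exact h ⟨rfl, h2⟩)
  · exact squeeze_cons_ne c _ hc

theorem squeeze_cons_repDD (s : List Char) (c : Char) :
    squeeze (c :: repDD s) = squeeze (c :: s) := by
  induction s using repDD.induct generalizing c with
  | case1 t ih =>
    rw [repDD_dd]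
    by_cases hc : c = '-'
    · subst hc
      simp only [squeeze_dd]
      exact ih '-'
    · rw [squeeze_cons₂_ne c '-' (repDD t) (by simp [hc]),
          squeeze_cons₂_ne c '-' ('-' :: t) (by simp [hc]),
          squeeze_dd, ih '-']
  | case2 c2 t hne ih =>
    have h2 : repDD (c2 :: t) = c2 :: repDD t := by
      by_cases hc2 : c2 = '-'
      · subst hc2
        apply repDD_dash_cons
        intro hh
        cases t with
        | nil => simp at hh
        | cons d t2 =>
          simp at hh
          exact hne t2 rfl (by rw [hh])
      · exact repDD_cons_ne c2 t hc2
    rw [h2]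
    by_cases hc : c = '-' ∧ c2 = '-'
    · obtain ⟨rfl, rfl⟩ := hc
      simp only [squeeze_dd]
      exact ih '-'
    · rw [squeeze_cons₂_ne c c2 (repDD t) hc, squeeze_cons₂_ne c c2 t hc, ih c2]
  | case3 => rfl

theorem squeeze_repDD (s : List Char) : squeeze (repDD s) = squeeze s := by
  cases s with
  | nil => rfl
  | cons c t =>
    by_cases hdd : c = '-' ∧ t.head? = some '-'
    · obtain ⟨rfl, hh⟩ := hdd
      cases t with
      | nil => simp at hh
      | cons d t2 =>
        simp at hh; subst hh
        rw [repDD_dd, squeeze_dd, squeeze_cons_repDD]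
    · have : repDD (c :: t) = c :: repDD t := by
        by_cases hc : c = '-'
        · subst hc
          exact repDD_dash_cons t (fun hh => hdd ⟨rfl, hh⟩)
        · exact repDD_cons_ne c t hc
      rw [this, squeeze_cons_repDD]

theorem squeeze_no_dd (s : List Char) (h : ¬ ['-', '-'] <:+: s) : squeeze s = s := by
  induction s using repDD.induct with
  | case1 t ih => exact absurd ⟨[], t, by simp⟩ h
  | case2 c t hne ih =>
    have hti : ¬ ['-', '-'] <:+: t := fun hinf => h (hinf.trans (List.suffix_cons c t).isInfix)
    have h2 : squeeze (c :: t) = c :: squeeze t := by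
      by_cases hc : c = '-'
      · subst hc
        apply squeeze_dash_cons
        intro hh
        cases t with
        | nil => simp at hh
        | cons d t2 =>
          simp at hh
          exact hne t2 rfl (by rw [hh])
      · exact squeeze_cons_ne c t hc
    rw [h2, ih hti]
  | case3 => simp [squeeze]

theorem collapse_eq_squeeze (s : List Char) : safe_slug_collapse s = squeeze s := by
  induction s using safe_slug_collapse.induct with
  | case1 s h ih =>
    rw [safe_slug_collapse, dif_pos h, ih, replace_dd_eq_repDD, squeeze_repDD]
  | case2 s h =>
    rw [safe_slug_collapse, dif_neg h]
    exact (squeeze_no_dd s (fun hinf => h ((PySem.Chars.isIn_iff_infix _ _).mpr hinf))).symm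

-- strip helpers
def rstripD (s : List Char) : List Char :=
  (s.reverse.dropWhile (fun c => ['-'].contains c)).reverse

theorem stripChars_dash_eq (s : List Char) :
    PySem.Chars.stripChars s ['-'] = rstripD (s.dropWhile (fun c => ['-'].contains c)) := by
  simp [PySem.Chars.stripChars, rstripD]

theorem rstripD_append (u v : List Char) :
    rstripD (u ++ v) = if rstripD v = [] then rstripD u else u ++ rstripD v := by
  unfold rstripD
  rw [List.reverse_append, List.dropWhile_append]
  by_cases h : (v.reverse.dropWhile (fun c => ['-'].contains c)).isEmpty
  · rw [if_pos h, if_pos (by simpa [List.isEmpty_iff] using h)]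
  · rw [if_neg h, if_neg (by simpa [List.isEmpty_iff] using h)]
    simp

theorem rstripD_no_dash (s : List Char) (h : ∀ x ∈ s, x ≠ '-') : rstripD s = s := by
  unfold rstripD
  rw [List.dropWhile_eq_self_iff.mpr, List.reverse_reverse]
  intro hx
  have hm := List.getElem_mem (l := s.reverse) (n := 0) (h := by omega)
  have := h _ (List.mem_reverse.mp hm)
  simpa using this

theorem squeeze_append_no_dash (w x : List Char) (h : ∀ c ∈ w, c ≠ '-') :
    squeeze (w ++ x) = w ++ squeeze x := by
  induction w with
  | nil => simp
  | cons c w' ih =>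
    rw [List.cons_append, squeeze_cons_ne c _ (h c (by simp)), ih (fun d hd => h d (by simp [hd]))]
    simp

-- join with single dashes (what both sides compute on the word list)
def interD : List (List Char) → List Char
  | [] => []
  | [a] => a
  | a :: rest => a ++ '-' :: interD rest

theorem interD_eq_intercalate (ws : List (List Char)) :
    interD ws = List.intercalate ['-'] ws := by
  induction ws with
  | nil => simp [interD, List.intercalate]
  | cons a rest ih =>
    cases rest with
    | nil => simp [interD, List.intercalate]
    | cons b rest2 =>
      rw [show interD (a :: b :: rest2) = a ++ '-' :: interD (b :: rest2) from rfl, ih]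
      simp [List.intercalate, List.intersperse]

theorem wordsD_dash (t : List Char) : wordsD ('-' :: t) = wordsD t := by
  rw [wordsD]; simp

theorem wordsD_cons (c : Char) (t : List Char) (hc : c ≠ '-') :
    wordsD (c :: t) = (c :: t.takeWhile (· ≠ '-')) :: wordsD (t.dropWhile (· ≠ '-')) := by
  rw [wordsD]; simp [hc]

theorem takeWhile_no_dash (t : List Char) : ∀ x ∈ t.takeWhile (· ≠ '-'), x ≠ '-' := by
  intro x hx
  have := List.mem_takeWhile_imp hx
  simpa using this

theorem squeeze_split (c : Char) (t : List Char) (hc : c ≠ '-') :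
    squeeze (c :: t) = (c :: t.takeWhile (· ≠ '-')) ++ squeeze (t.dropWhile (· ≠ '-')) := by
  rw [squeeze_cons_ne c t hc]
  conv_lhs => rw [← List.takeWhile_append_dropWhile (p := (· ≠ '-')) (l := t)]
  rw [squeeze_append_no_dash _ _ (takeWhile_no_dash t)]
  simp

theorem dropWhile_dash_head (t : List Char) (h : t.dropWhile (· ≠ '-') ≠ []) :
    ∃ r, t.dropWhile (· ≠ '-') = '-' :: r := by
  induction t with
  | nil => simp at h
  | cons c t2 ih =>
    by_cases hc : c = '-'
    · exact ⟨t2, by simp [List.dropWhile, hc]⟩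
    · rw [List.dropWhile_cons_of_pos (by simp [hc])] at h ⊢
      exact ih h

theorem rstripD_word (c : Char) (w : List Char) (hc : c ≠ '-') (hw : ∀ x ∈ w, x ≠ '-') :
    rstripD (c :: w) = c :: w :=
  rstripD_no_dash _ (by intro x hx; rcases List.mem_cons.mp hx with rfl | hx; exact hc; exact hw x hx)

-- A-side characterisation: rstrip of squeeze for dash-headed lists
theorem rstripD_squeeze_dash (n : Nat) : ∀ k : List Char, k.length ≤ n → k.head? = some '-' →
    rstripD (squeeze k) = if wordsD k = [] then [] else '-' :: interD (wordsD k) := by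
  induction n with
  | zero => intro k hk hh; cases k <;> simp at hk hh
  | succ n ih =>
    intro k hk hh
    cases k with
    | nil => simp at hh
    | cons c0 t =>
      simp at hh; subst hh
      cases t with
      | nil => simp [squeeze, rstripD, wordsD]
      | cons c t2 =>
        by_cases hc : c = '-'
        · subst hc
          rw [squeeze_dd, wordsD_dash]
          exact ih ('-' :: t2) (by simp at hk ⊢; omega) rfl
        · rw [squeeze_dash_cons _ (by simp [hc]), squeeze_split c t2 hc, wordsD_dash,
              wordsD_cons c t2 hc]
          set w := t2.takeWhile (· ≠ '-') with hwdef
          set rr := t2.dropWhile (· ≠ '-') with hrdef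
          have hR : rstripD (squeeze rr) = if wordsD rr = [] then [] else '-' :: interD (wordsD rr) := by
            rcases Decidable.em (rr = []) with hrr | hrr
            · rw [hrr]; simp [squeeze, rstripD, wordsD]
            · obtain ⟨r2, hr2⟩ := dropWhile_dash_head t2 hrr
              have hlen : rr.length ≤ n := by
                rw [hrdef]
                have := List.length_dropWhile_le (p := (· ≠ '-')) (l := t2)
                simp at hk; omega
              exact ih rr hlen (by rw [hrdef, hr2]; rfl)
          have hu : ('-' :: (c :: w) ++ squeeze rr) = ('-' :: c :: w) ++ squeeze rr := by simp
          rw [show ('-' :: ((c :: w) ++ squeeze rr)) = ('-' :: c :: w) ++ squeeze rr by simp]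
          rw [rstripD_append]
          have hcw : rstripD (c :: w) = c :: w := rstripD_word c w hc (takeWhile_no_dash t2)
          have hu2 : rstripD ('-' :: c :: w) = '-' :: c :: w := by
            rw [show ('-' :: c :: w) = ['-'] ++ (c :: w) by simp, rstripD_append, hcw]
            simp
          rcases Decidable.em (wordsD rr = []) with hwr | hwr
          · have hR0 : rstripD (squeeze rr) = [] := by rw [hwr] at hR; simpa using hR
            rw [hR0, if_pos rfl, hu2, hwr]
            simp [interD]
          · rw [hR, if_neg hwr, if_neg (by simp), if_neg (by simp)]
            cases hwd : wordsD rr with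
            | nil => exact absurd hwd hwr
            | cons a rest => simp [interD]

-- A-side: strip(squeeze k) = "-".join(wordsD k)
theorem strip_squeeze_eq (n : Nat) : ∀ k : List Char, k.length ≤ n →
    PySem.Chars.stripChars (squeeze k) ['-'] = interD (wordsD k) := by
  induction n with
  | zero =>
    intro k hk
    have hk0 : k = [] := List.length_eq_zero_iff.mp (Nat.le_zero.mp hk)
    subst hk0
    simp [squeeze, wordsD, PySem.Chars.stripChars, interD]
  | succ n ih =>
    intro k hk
    cases k with
    | nil => simp [squeeze, wordsD, PySem.Chars.stripChars, interD]
    | cons c t =>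
      by_cases hc : c = '-'
      · subst hc
        cases t with
        | nil => simp [squeeze, wordsD, PySem.Chars.stripChars, interD]
        | cons d t2 =>
          by_cases hd : d = '-'
          · subst hd
            rw [squeeze_dd, wordsD_dash]
            exact ih ('-' :: t2) (by simp at hk ⊢; omega)
          · rw [squeeze_dash_cons _ (by simp [hd]), wordsD_dash, stripChars_dash_eq,
                List.dropWhile_cons_of_pos (by simp)]
            rw [← stripChars_dash_eq]
            exact ih (d :: t2) (by simp at hk ⊢; omega)
      · rw [squeeze_split c t hc, wordsD_cons c t hc, stripChars_dash_eq, List.cons_append,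
            List.dropWhile_cons_of_neg (by simp [hc]), ← List.cons_append]
        set w := t.takeWhile (· ≠ '-') with hwdef
        set rr := t.dropWhile (· ≠ '-') with hrdef
        have hR : rstripD (squeeze rr) = if wordsD rr = [] then [] else '-' :: interD (wordsD rr) := by
          rcases Decidable.em (rr = []) with hrr | hrr
          · rw [hrr]; simp [squeeze, rstripD, wordsD]
          · obtain ⟨r2, hr2⟩ := dropWhile_dash_head t hrr
            have hlen : rr.length ≤ n := by
              rw [hrdef]
              have := List.length_dropWhile_le (p := (· ≠ '-')) (l := t)
              simp at hk; omega
            exact rstripD_squeeze_dash n rr hlen (by rw [hrdef, hr2]; rfl)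
        rw [rstripD_append]
        have hcw : rstripD (c :: w) = c :: w := rstripD_word c w hc (takeWhile_no_dash t)
        rcases Decidable.em (wordsD rr = []) with hwr | hwr
        · have hR0 : rstripD (squeeze rr) = [] := by rw [hwr] at hR; simpa using hR
          rw [hR0, if_pos rfl, hcw, hwr]
          simp [interD]
        · rw [hR, if_neg hwr, if_neg (by simp)]
          cases hwd : wordsD rr with
          | nil => exact absurd hwd hwr
          | cons a rest => simp [interD]

-- characters
def d2s (c : Char) : Char := if c = '-' then ' ' else c

theorem isalnum_not_space (c : Char) (h : PySem.Chars.isalnum c = true) :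
    PySem.Chars.isspace c = false := by
  simp [PySem.Chars.isalnum, PySem.Chars.isalpha, PySem.Chars.isupper, PySem.Chars.islower,
    PySem.Chars.isdigit, Char.le_def, UInt32.le_iff_toNat_le] at h
  simp [PySem.Chars.isspace]
  omega

theorem isalnum_ne_dash (c : Char) (h : PySem.Chars.isalnum c = true) : c ≠ '-' := by
  intro rfl
  simp [PySem.Chars.isalnum, PySem.Chars.isalpha, PySem.Chars.isupper, PySem.Chars.islower,
    PySem.Chars.isdigit] at h

-- B-side characterisation: split() of the space-mapped list is wordsD
theorem split0_go_spec (k : List Char) (h : ∀ c ∈ k, PySem.Chars.isalnum c = true ∨ c = '-') :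
    ∀ acc : List (List Char),
      (PySem.Chars.split₀.go (k.map d2s) [] acc = acc.reverse ++ wordsD k) ∧
      (∀ cur : List Char, cur ≠ [] →
        PySem.Chars.split₀.go (k.map d2s) cur acc =
          acc.reverse ++ (cur.reverse ++ k.takeWhile (· ≠ '-')) :: wordsD (k.dropWhile (· ≠ '-'))) := by
  induction k with
  | nil =>
    intro acc
    refine ⟨by simp [PySem.Chars.split₀.go, wordsD], ?_⟩
    intro cur hcur
    simp [PySem.Chars.split₀.go, wordsD, hcur]
  | cons c t ih =>
    have ht : ∀ x ∈ t, PySem.Chars.isalnum x = true ∨ x = '-' := fun x hx => h x (by simp [hx])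
    intro acc
    rcases h c (by simp) with hal | hdash
    · have hcd : c ≠ '-' := isalnum_ne_dash c hal
      have hd2 : d2s c = c := by simp [d2s, hcd]
      have hsp : PySem.Chars.isspace c = false := isalnum_not_space c hal
      constructor
      · rw [List.map_cons, hd2, PySem.Chars.split₀.go]
        simp only [hsp, Bool.false_eq_true, if_false]
        rw [(ih ht acc).2 [c] (by simp), wordsD_cons c t hcd]
        simp
      · intro cur hcur
        rw [List.map_cons, hd2, PySem.Chars.split₀.go]
        simp only [hsp, Bool.false_eq_true, if_false]
        rw [(ih ht acc).2 (c :: cur) (by simp)]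
        rw [List.takeWhile_cons_of_pos (by simp [hcd]), List.dropWhile_cons_of_pos (by simp [hcd])]
        simp
    · subst hdash
      have hd2 : d2s '-' = ' ' := by simp [d2s]
      constructor
      · rw [List.map_cons, hd2, PySem.Chars.split₀.go]
        rw [if_pos (show PySem.Chars.isspace ' ' = true from rfl), if_pos (by simp)]
        rw [(ih ht acc).1, wordsD_dash]
      · intro cur hcur
        rw [List.map_cons, hd2, PySem.Chars.split₀.go]
        rw [if_pos (show PySem.Chars.isspace ' ' = true from rfl)]
        rw [if_neg (by simpa [List.isEmpty_iff] using hcur)]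
        rw [(ih ht (cur.reverse :: acc)).1]
        rw [List.takeWhile_cons_of_neg (by simp), List.dropWhile_cons_of_neg (by simp), wordsD_dash]
        simp

theorem split0_spec (k : List Char) (h : ∀ c ∈ k, PySem.Chars.isalnum c = true ∨ c = '-') :
    PySem.Chars.split₀ (k.map d2s) = wordsD k := by
  rw [PySem.Chars.split₀]
  rw [(split0_go_spec k h []).1]
  simp

-- fold rewriting
def gA (ch : Char) : List Char :=
  if PySem.Chars.strIsalnum [ch] then [ch]
  else if ch = ' ' ∨ ch = '-' ∨ ch = '_' then ['-'] else []

def gB (ch : Char) : List Char :=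
  if PySem.Chars.strIsalnum [ch] then [ch]
  else if PySem.Chars.isIn [ch] [' ', '-', '_'] then [' '] else []

theorem foldA_eq (l : List Char) :
    l.foldl (fun acc ch =>
      if PySem.Chars.strIsalnum [ch] then acc ++ [ch]
      else if ch = ' ' ∨ ch = '-' ∨ ch = '_' then acc ++ ['-'] else acc) [] = l.flatMap gA := by
  have hstep : (fun (acc : List Char) ch =>
      if PySem.Chars.strIsalnum [ch] then acc ++ [ch]
      else if ch = ' ' ∨ ch = '-' ∨ ch = '_' then acc ++ ['-'] else acc) =
      (fun acc ch => acc ++ gA ch) := by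
    funext acc ch
    simp only [gA]
    split_ifs <;> simp
  rw [hstep, PySem.List.foldl_append_eq_flatMap]
  simp

theorem foldB_eq (l : List Char) :
    l.foldl (fun acc ch =>
      acc ++ (if PySem.Chars.strIsalnum [ch] then [ch]
              else if PySem.Chars.isIn [ch] [' ', '-', '_'] then [' '] else [])) [] = l.flatMap gB := by
  have hstep : (fun (acc : List Char) ch =>
      acc ++ (if PySem.Chars.strIsalnum [ch] then [ch]
              else if PySem.Chars.isIn [ch] [' ', '-', '_'] then [' '] else [])) =
      (fun acc ch => acc ++ gB ch) := by
    funext acc ch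
    simp [gB]
  rw [hstep, PySem.List.foldl_append_eq_flatMap]
  simp

theorem singleton_isIn (ch : Char) (l : List Char) :
    PySem.Chars.isIn [ch] l = l.contains ch := by
  by_cases hm : ch ∈ l
  · rw [List.contains_eq_mem, decide_eq_true hm, (PySem.Chars.isIn_iff_infix _ _).mpr]
    obtain ⟨u, v, rfl⟩ := List.append_of_mem hm
    exact ⟨u, v, by simp⟩
  · rw [List.contains_eq_mem, decide_eq_false hm, PySem.Chars.isIn_eq_false_iff]
    intro hinf
    exact hm (hinf.subset (by simp))

theorem map_d2s_gA (ch : Char) : (gA ch).map d2s = gB ch := by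
  simp only [gA, gB, PySem.Chars.strIsalnum, singleton_isIn]
  by_cases hal : PySem.Chars.isalnum ch = true
  · simp [hal, d2s, isalnum_ne_dash ch hal]
  · by_cases hm : ch = ' ' ∨ ch = '-' ∨ ch = '_'
    · have hcont : [' ', '-', '_'].contains ch = true := by
        rcases hm with rfl | rfl | rfl <;> simp
    
      simp [hal, hm, d2s]
    · have hcont : [' ', '-', '_'].contains ch = false := by
        simp only [List.contains_eq_mem]
        simpa using hm
      simp [hal, hm]

theorem keep_chars (l : List Char) :
    ∀ c ∈ l.flatMap gA, PySem.Chars.isalnum c = true ∨ c = '-' := by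
  intro c hc
  rw [List.mem_flatMap] at hc
  obtain ⟨ch, _, hc⟩ := hc
  simp only [gA, PySem.Chars.strIsalnum] at hc
  split_ifs at hc with h1 h2
  · simp at hc h1
    exact Or.inl (hc ▸ h1)
  · simp at hc
    exact Or.inr hc
  · simp at hc

-- ===== VERDICT (by name: the statement is the Claim_ definition above) =====
theorem safe_slug_py_spec : Claim_equal_safe_slug_py := by
  intro text _
  unfold Spec_safe_slug_py safe_slug_py safe_slug_py_alt
  have hmain : PySem.Chars.stripChars
        (safe_slug_collapse ((PySem.Str.lower text).toList.flatMap gA)) ['-'] =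
      PySem.Chars.join ['-']
        (PySem.Chars.split₀ ((PySem.Str.lower text).toList.flatMap gB)) := by
    set k := ((PySem.Str.lower text).toList).flatMap gA with hk
    have hB : k.map d2s = ((PySem.Str.lower text).toList).flatMap gB := by
      rw [hk, List.map_flatMap]
      simp only [map_d2s_gA]
    rw [← hB, collapse_eq_squeeze, split0_spec k (keep_chars _), PySem.Chars.join,
        strip_squeeze_eq k.length k (le_refl _), interD_eq_intercalate]
  simp only [foldA_eq, foldB_eq, hmain]
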